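-- pv_equiv track=rewrite | github.com/NimaJafariComp/Strategy-Mining-in-Custom-RL-Environments-Dual-Path-Discovery-and-Robust-Graph-Clustering | dependency_matrices/v3/Alg_Most_Rel_W.py | occurs_before
-- ===== SOURCE A (Python) =====
-- def occurs_before(seq, e_i, e_j):
--     seen_i, seen_j = None, None
--     for idx, term in enumerate(seq):
--         elements = list(term) if isinstance(term, tuple) else [term]
--         if e_i in elements and seen_i is None:
--             seen_i = idx
--         if e_j in elements and seen_j is None:
--             seen_j = idx
--     return (seen_i is not None and seen_j is not None and seen_i < seen_j)
-- ===== SOURCE B (Python) =====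
-- def occurs_before(seq, e_i, e_j):
--     def _contains(term, e):
--         return e in term if isinstance(term, tuple) else e == term
--
--     def _first(e):
--         return next((idx for idx, t in enumerate(seq) if _contains(t, e)), None)
--
--     i = _first(e_i)
--     j = _first(e_j)
--     return i is not None and j is not None and i < j
-- ===== Notes on version B (the rewrite author's own statement) =====
-- stated objective: simpler
-- what changed: A's single combined scan carrying two pieces of shared loop state is replaced by two independent first-occurrence searches (early-exiting generator per event) composed at the end; B also stops scanning at the first hit instead of always traversing the whole sequence.
import Mathlib
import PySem

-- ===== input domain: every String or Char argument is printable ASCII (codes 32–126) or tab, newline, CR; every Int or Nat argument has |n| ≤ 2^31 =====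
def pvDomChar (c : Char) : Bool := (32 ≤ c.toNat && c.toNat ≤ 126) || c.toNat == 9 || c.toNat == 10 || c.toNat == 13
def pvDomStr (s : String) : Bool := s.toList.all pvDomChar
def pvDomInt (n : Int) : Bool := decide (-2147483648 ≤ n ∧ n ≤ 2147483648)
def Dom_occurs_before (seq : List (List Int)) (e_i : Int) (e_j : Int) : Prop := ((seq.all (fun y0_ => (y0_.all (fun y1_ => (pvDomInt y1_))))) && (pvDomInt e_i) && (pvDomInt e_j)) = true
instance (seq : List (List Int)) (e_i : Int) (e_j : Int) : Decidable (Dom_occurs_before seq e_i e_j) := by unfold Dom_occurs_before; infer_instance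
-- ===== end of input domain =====

-- B replaces A's single combined scan (shared seen_i/seen_j state) by two independent
-- early-exiting first-occurrence searches; objective: simpler. Same return value everywhere.

-- ===== PORT A =====
-- A's for-loop over enumerate(seq), carrying (seen_i, seen_j); a term is a tuple of ints,
-- so `elements = list(term)` and membership is list membership.
def occursLoopA (ei ej : Int) : List (List Int) → Nat → Option Nat × Option Nat → Option Nat × Option Nat
  | [], _, s => s
  | term :: rest, idx, (si, sj) =>
    let si' := if term.contains ei && si.isNone then some idx else si
    let sj' := if term.contains ej && sj.isNone then some idx else sj
    occursLoopA ei ej rest (idx + 1) (si', sj')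

def occurs_before (seq : List (List Int)) (e_i : Int) (e_j : Int) : Bool :=
  match occursLoopA e_i e_j seq 0 (none, none) with
  | (some i, some j) => decide (i < j)
  | _ => false

-- ===== PORT B =====
-- B's `next((idx for idx, t in enumerate(seq) if _contains(t, e)), None)`: first index whose
-- term contains e (terms are tuples here, so _contains is tuple membership).
def firstIdx (e : Int) : List (List Int) → Nat → Option Nat
  | [], _ => none
  | t :: rest, k => if t.contains e then some k else firstIdx e rest (k + 1)

def occurs_before_alt (seq : List (List Int)) (e_i : Int) (e_j : Int) : Bool :=
  match firstIdx e_i seq 0 with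
  | none => false
  | some i =>
    match firstIdx e_j seq 0 with
    | none => false
    | some j => decide (i < j)

-- ===== PRECONDITION & SPEC =====
def Spec_occurs_before (seq : List (List Int)) (e_i : Int) (e_j : Int) (out : Bool) : Prop := out = occurs_before_alt seq e_i e_j
instance (seq : List (List Int)) (e_i : Int) (e_j : Int) (out : Bool) : Decidable (Spec_occurs_before seq e_i e_j out) := by unfold Spec_occurs_before; infer_instance

-- ===== CLAIM (what is proved, stated in full; the proofs are below) =====
def Claim_equal_occurs_before : Prop := ∀ (seq : List (List Int)) (e_i : Int) (e_j : Int), Dom_occurs_before seq e_i e_j → Spec_occurs_before seq e_i e_j (occurs_before seq e_i e_j)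

-- ===== LEMMAS AND PROOFS =====

-- A's loop with accumulators (si, sj) ends at (si or first hit from here, sj or first hit from here).
theorem occursLoopA_eq (ei ej : Int) : ∀ (seq : List (List Int)) (k : Nat) (si sj : Option Nat),
    occursLoopA ei ej seq k (si, sj) =
      ((si.rec (firstIdx ei seq k) (fun v => some v) : Option Nat),
       (sj.rec (firstIdx ej seq k) (fun v => some v) : Option Nat)) := by
  intro seq
  induction seq with
  | nil => intro k si sj; cases si <;> cases sj <;> simp [occursLoopA, firstIdx]
  | cons t rest ih =>
    intro k si sj
    cases si <;> cases sj <;>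
      simp only [occursLoopA, Option.isNone, Bool.and_true, Bool.and_false, ih, firstIdx] <;>
      by_cases hi : ei ∈ t <;> by_cases hj : ej ∈ t <;>
      simp [hi, hj]

-- ===== VERDICT (by name: the statement is the Claim_ definition above) =====
theorem occurs_before_spec : Claim_equal_occurs_before := by
  intro seq e_i e_j _
  unfold Spec_occurs_before occurs_before occurs_before_alt
  rw [occursLoopA_eq]
  cases firstIdx e_i seq 0 <;> cases firstIdx e_j seq 0 <;> rfl
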